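-- pv_equiv track=rewrite | github.com/ronpik/recsys-bgu | kaggle/preprocess/features.py | get_categories_by_depth
-- ===== SOURCE A (Python) =====
-- from typing import Tuple, Sequence, Set, Any, Dict, List
--
-- NO_TAX_CATEGORY_VALUE = "NO_CATEGORY"
--
-- def get_categories_by_depth(taxonomy_values: Sequence[str]) -> List[List[str]]:
--     """
--     extract the taxonomy strings into smaller categories with hierarchy.
--     :param taxonomy_values: list of taxonomy values, where each value contains the ancestors categories, ordered and splitted by '~'.
--     :return: list of lists of categories. the category list at index i, corresponds to the categories in depth i in the taxonomy.
--     """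
--     categories_by_hierarchy = [[], [], []]
--     for tax in taxonomy_values:
--         tax_categories = tax.split("~")
--         for i in range(len(categories_by_hierarchy)):
--             category = tax_categories[i] if i < len(tax_categories) else NO_TAX_CATEGORY_VALUE
--             categories_by_hierarchy[i].append(category)
--
--     return categories_by_hierarchy
-- ===== SOURCE B (Python) =====
-- NO_TAX_CATEGORY_VALUE = "NO_CATEGORY"
--
-- def get_categories_by_depth(taxonomy_values):
--     rows = [(tax.split("~") + [NO_TAX_CATEGORY_VALUE] * 3)[:3] for tax in taxonomy_values]
--     if not rows:
--         return [[], [], []]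
--     return [list(col) for col in zip(*rows)]
-- ===== Notes on version B (the rewrite author's own statement) =====
-- stated objective: simpler
-- what changed: Replaces the column-distribution double loop (appending to each depth list per row) with a build-padded-rows-then-transpose decomposition.
import Mathlib
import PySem

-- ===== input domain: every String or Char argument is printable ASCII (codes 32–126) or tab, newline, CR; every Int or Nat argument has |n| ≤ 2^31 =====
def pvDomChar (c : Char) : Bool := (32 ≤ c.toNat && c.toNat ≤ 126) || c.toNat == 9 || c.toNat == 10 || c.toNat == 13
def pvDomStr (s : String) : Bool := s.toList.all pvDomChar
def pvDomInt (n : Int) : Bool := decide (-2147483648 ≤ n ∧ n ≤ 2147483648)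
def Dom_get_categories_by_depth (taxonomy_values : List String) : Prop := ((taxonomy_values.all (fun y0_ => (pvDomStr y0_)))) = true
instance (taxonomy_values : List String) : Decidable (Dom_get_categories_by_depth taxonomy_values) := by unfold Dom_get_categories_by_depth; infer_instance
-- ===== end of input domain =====

-- ===== PORT A =====
-- A: distribute each row's categories column-by-column into three accumulator lists.
-- loop body of A's outer `for tax in taxonomy_values`
def pvStepA (acc : List (List String)) (tax : String) : List (List String) :=
  let tax_categories := (PySem.Str.split? tax "~").getD []
  (List.range 3).foldl (fun acc i =>
    let category := if i < tax_categories.length then tax_categories.getD i "NO_CATEGORY" else "NO_CATEGORY"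
    acc.set i (acc.getD i [] ++ [category])) acc

def get_categories_by_depth (taxonomy_values : List String) : List (List String) :=
  taxonomy_values.foldl pvStepA [[], [], []]

-- ===== PORT B =====
-- B: build padded/truncated 3-entry rows, then transpose (zip(*rows)); empty input guarded.
def get_categories_by_depth_alt (taxonomy_values : List String) : List (List String) :=
  let rows := taxonomy_values.map (fun tax =>
    ((PySem.Str.split? tax "~").getD [] ++ ["NO_CATEGORY", "NO_CATEGORY", "NO_CATEGORY"]).take 3)
  if rows = [] then [[], [], []]
  else [rows.map (fun r => r.getD 0 ""), rows.map (fun r => r.getD 1 ""), rows.map (fun r => r.getD 2 "")]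

-- ===== PRECONDITION & SPEC =====
def Spec_get_categories_by_depth (taxonomy_values : List String) (out : List (List String)) : Prop := out = get_categories_by_depth_alt taxonomy_values
instance (taxonomy_values : List String) (out : List (List String)) : Decidable (Spec_get_categories_by_depth taxonomy_values out) := by unfold Spec_get_categories_by_depth; infer_instance

-- ===== CLAIM (what is proved, stated in full; the proofs are below) =====
def Claim_equal_get_categories_by_depth : Prop := ∀ (taxonomy_values : List String), Dom_get_categories_by_depth taxonomy_values → Spec_get_categories_by_depth taxonomy_values (get_categories_by_depth taxonomy_values)

-- ===== LEMMAS AND PROOFS =====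

-- the per-depth category a row contributes at depth i
def pvCol (i : Nat) (tax : String) : String :=
  let tc := (PySem.Str.split? tax "~").getD []
  if i < tc.length then tc.getD i "NO_CATEGORY" else "NO_CATEGORY"

lemma pvStepA_eval (a b c : List String) (t : String) :
    pvStepA [a, b, c] t = [a ++ [pvCol 0 t], b ++ [pvCol 1 t], c ++ [pvCol 2 t]] := by
  simp [pvStepA, pvCol, show List.range 3 = [0, 1, 2] from rfl, List.getD, List.set]

lemma pvA_loop (tv : List String) (a b c : List String) :
    tv.foldl pvStepA [a, b, c] =
      [a ++ tv.map (pvCol 0), b ++ tv.map (pvCol 1), c ++ tv.map (pvCol 2)] := by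
  induction tv generalizing a b c with
  | nil => simp
  | cons t ts ih =>
    rw [List.foldl_cons, pvStepA_eval, ih]
    simp

lemma pvPad_getD (l : List String) (i : Nat) (hi : i < 3) :
    ((l ++ ["NO_CATEGORY", "NO_CATEGORY", "NO_CATEGORY"]).take 3).getD i "" =
      if i < l.length then l.getD i "NO_CATEGORY" else "NO_CATEGORY" := by
  interval_cases i <;>
    match l with
    | [] => simp
    | [a] => simp
    | [a, b] => simp [List.getD]
    | a :: b :: c :: t => simp [List.getD]

lemma pvColMap (tv : List String) (i : Nat) (hi : i < 3) :
    (tv.map (fun tax =>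
        ((PySem.Str.split? tax "~").getD [] ++ ["NO_CATEGORY", "NO_CATEGORY", "NO_CATEGORY"]).take 3)).map
      (fun r => r.getD i "") = tv.map (pvCol i) := by
  rw [List.map_map]
  refine List.map_congr_left (fun tax _ => ?_)
  simp only [Function.comp_apply]
  rw [pvPad_getD _ _ hi]
  rfl

-- ===== VERDICT (by name: the statement is the Claim_ definition above) =====
theorem get_categories_by_depth_spec : Claim_equal_get_categories_by_depth := by
  intro tv _
  unfold Spec_get_categories_by_depth get_categories_by_depth get_categories_by_depth_alt
  rw [pvA_loop]
  cases tv with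
  | nil => simp
  | cons t ts =>
    rw [if_neg (by simp)]
    rw [pvColMap (t :: ts) 0 (by omega), pvColMap (t :: ts) 1 (by omega),
        pvColMap (t :: ts) 2 (by omega)]
    simp
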